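-- pv_equiv track=rewrite | github.com/RobPruzan/Northstar-web | model_server/functions.py | calculate_ngram_freqs
-- ===== SOURCE A (Python) =====
-- from collections import Counter
-- from typing import List, Tuple, Dict
-- from typing import List
--
-- def calculate_ngram_freqs(
--     documents: List[Tuple[str, str]], n: int
-- ) -> Tuple[Dict[str, Dict[str, int]], Dict[str, int]]:
--     """
--     Calculates the frequency of each n-gram for each category from a corpra of documents.
--
--     Returns a dictionary where the keys are the categories and the values are
--     dictionaries that map n-grams to their frequency.
--     """
--     ngram_freqs = {}
--     category_frequencies = {}
--     for text, category in documents: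
--         if category not in ngram_freqs:
--             ngram_freqs[category] = Counter()
--
--         words = text.split()
--         for i in range(len(words) - n + 1):
--             ngram = " ".join(words[i : i + n])
--             ngram_freqs[category][ngram] += 1
--             category_frequencies[category] = category_frequencies.get(category, 0) + 1
--
--     return ngram_freqs, category_frequencies
-- ===== SOURCE B (Python) =====
-- from collections import Counter
--
--
-- def _ngrams(words, n):
--     """All n-grams of words (joined by single spaces), built with a rolling window."""
--     if n <= 0 or len(words) < n:
--         return []
--     window = words[:n]
--     grams = [" ".join(window)]
--     for w in words[n:]:
--         window = window[1:] + [w]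
--         grams.append(" ".join(window))
--     return grams
--
--
-- def calculate_ngram_freqs(documents, n):
--     ngram_freqs = {}
--     category_frequencies = {}
--     for text, category in documents:
--         if category not in ngram_freqs:
--             ngram_freqs[category] = Counter()
--         grams = _ngrams(text.split(), n)
--         ngram_freqs[category].update(grams)
--         if grams:
--             category_frequencies[category] = (
--                 category_frequencies.get(category, 0) + len(grams)
--             )
--     return ngram_freqs, category_frequencies
-- ===== Notes on version B (the rewrite author's own statement) =====
-- stated objective: alternative
-- what changed: B builds each document's n-gram list with a rolling-window helper (slide the n-word window one word at a time instead of slicing at every index), feeds it to the category Counter in one bulk update, and bumps the per-category total once per document by the n-gram count instead of once per n-gram.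
-- intended difference: For n <= 0 with a nonempty document list, A returns len(words)-n+1 degenerate ''-style n-grams per document (an artefact of Python slicing, e.g. Counter({'': 2}) for n=0), while B returns an empty Counter per category and no category totals, which is the intended value since there are no n-grams of non-positive length. — e.g. on calculate_ngram_freqs([("a", "c")], 0): A returns (([("c", [("", 2)])]), [("c", 2)]), B returns (([("c", [])]), [])
import Mathlib
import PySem

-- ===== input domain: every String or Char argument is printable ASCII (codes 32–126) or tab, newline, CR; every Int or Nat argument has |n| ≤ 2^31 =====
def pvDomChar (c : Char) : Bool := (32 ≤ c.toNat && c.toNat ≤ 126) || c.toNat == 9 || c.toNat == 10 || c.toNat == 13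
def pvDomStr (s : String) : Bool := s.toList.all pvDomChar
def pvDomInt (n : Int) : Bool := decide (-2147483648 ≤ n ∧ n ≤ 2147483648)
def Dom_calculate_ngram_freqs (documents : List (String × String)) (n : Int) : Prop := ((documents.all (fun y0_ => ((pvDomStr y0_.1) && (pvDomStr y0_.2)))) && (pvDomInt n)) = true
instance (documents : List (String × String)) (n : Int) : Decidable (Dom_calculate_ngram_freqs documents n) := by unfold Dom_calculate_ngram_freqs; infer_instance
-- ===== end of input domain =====

-- B replaces A's per-index slice loop by a rolling-window n-gram helper, a bulk Counter.update and one
-- per-document increment of the per-category total (alternative decomposition, same cost).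

-- ===== PORT A =====
def calculate_ngram_freqs (documents : List (String × String)) (n : Int) :
    (List (String × List (String × Int))) × (List (String × Int)) :=
  let st := documents.foldl
    (fun (st : PySem.Dict String (PySem.Dict String Int) × PySem.Dict String Int) doc =>
      let nf := if st.1.contains doc.2 then st.1 else st.1.insert doc.2 PySem.Dict.empty
      let words := PySem.Str.split₀ doc.1
      (PySem.List.pyRange 0 ((words.length : Int) - n + 1) 1).foldl
        (fun st i =>
          let ngram := PySem.Str.join " " (PySem.List.slice words (some i) (some (i + n)))
          (st.1.modify doc.2 PySem.Dict.empty (fun c => c.modify ngram 0 (· + 1)),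
           st.2.insert doc.2 (st.2.getD doc.2 0 + 1)))
        (nf, st.2))
    (PySem.Dict.empty, PySem.Dict.empty)
  (st.1.items.map (fun p => (p.1, p.2.items)), st.2.items)

-- ===== PORT B =====
-- rolling-window n-gram list: window = words[:n], then slide by one word per step
def pvNgrams (words : List String) (n : Int) : List String :=
  if n ≤ 0 ∨ (words.length : Int) < n then []
  else
    let window := PySem.List.slice words none (some n)
    let st := (PySem.List.slice words (some n) none).foldl
      (fun (st : List String × List String) w =>
        let window := PySem.List.slice st.1 (some 1) none ++ [w]
        (window, st.2 ++ [PySem.Str.join " " window]))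
      (window, [PySem.Str.join " " window])
    st.2

def calculate_ngram_freqs_alt (documents : List (String × String)) (n : Int) :
    (List (String × List (String × Int))) × (List (String × Int)) :=
  let st := documents.foldl
    (fun (st : PySem.Dict String (PySem.Dict String Int) × PySem.Dict String Int) doc =>
      let nf := if st.1.contains doc.2 then st.1 else st.1.insert doc.2 PySem.Dict.empty
      let grams := pvNgrams (PySem.Str.split₀ doc.1) n
      let nf' := nf.insert doc.2
        (grams.foldl (fun c g => c.modify g 0 (· + 1)) (nf.getD doc.2 PySem.Dict.empty))
      let cf := if grams.isEmpty then st.2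
                else st.2.insert doc.2 (st.2.getD doc.2 0 + (grams.length : Int))
      (nf', cf))
    (PySem.Dict.empty, PySem.Dict.empty)
  (st.1.items.map (fun p => (p.1, p.2.items)), st.2.items)

-- ===== PRECONDITION & SPEC =====
-- For n ≤ 0 on a nonempty document list A counts len(words)-n+1 degenerate "n-grams" per document
-- (all equal to "" when n = 0) — an artefact of Python slicing; B returns empty counters and no
-- category totals, which is the intended value since there are no n-grams of non-positive length.
def D_calculate_ngram_freqs (documents : List (String × String)) (n : Int) : Prop :=
  n ≤ 0 ∧ documents ≠ []
instance (documents : List (String × String)) (n : Int) : Decidable (D_calculate_ngram_freqs documents n) := by unfold D_calculate_ngram_freqs; infer_instance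

def Spec_calculate_ngram_freqs (documents : List (String × String)) (n : Int)
    (out : (List (String × List (String × Int))) × (List (String × Int))) : Prop :=
  ¬ D_calculate_ngram_freqs documents n → out = calculate_ngram_freqs_alt documents n
instance (documents : List (String × String)) (n : Int) (out : (List (String × List (String × Int))) × (List (String × Int))) : Decidable (Spec_calculate_ngram_freqs documents n out) := by unfold Spec_calculate_ngram_freqs; infer_instance

def pvDiffWitness_calculate_ngram_freqs : (List (String × String)) × Int := ([("a", "c")], 0)
def pvDiffWitnessOut_calculate_ngram_freqs :
    ((List (String × List (String × Int))) × (List (String × Int))) ×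
    ((List (String × List (String × Int))) × (List (String × Int))) :=
  ((([("c", [("", 2)])]), [("c", 2)]), (([("c", [])]), []))

-- ===== CLAIM (what is proved, stated in full; the proofs are below) =====
def Claim_unchanged_calculate_ngram_freqs : Prop := ∀ (documents : List (String × String)) (n : Int), Dom_calculate_ngram_freqs documents n → Spec_calculate_ngram_freqs documents n (calculate_ngram_freqs documents n)
def Claim_changed_calculate_ngram_freqs : Prop := Dom_calculate_ngram_freqs (pvDiffWitness_calculate_ngram_freqs.1) (pvDiffWitness_calculate_ngram_freqs.2) ∧ D_calculate_ngram_freqs (pvDiffWitness_calculate_ngram_freqs.1) (pvDiffWitness_calculate_ngram_freqs.2) ∧ calculate_ngram_freqs (pvDiffWitness_calculate_ngram_freqs.1) (pvDiffWitness_calculate_ngram_freqs.2) = pvDiffWitnessOut_calculate_ngram_freqs.1 ∧ calculate_ngram_freqs_alt (pvDiffWitness_calculate_ngram_freqs.1) (pvDiffWitness_calculate_ngram_freqs.2) = pvDiffWitnessOut_calculate_ngram_freqs.2 ∧ pvDiffWitnessOut_calculate_ngram_freqs.1 ≠ pvDiffWitnessOut_calculate_ngram_freqs.2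
def Claim_exact_calculate_ngram_freqs : Prop := ∀ (documents : List (String × String)) (n : Int), Dom_calculate_ngram_freqs documents n → D_calculate_ngram_freqs documents n → calculate_ngram_freqs documents n ≠ calculate_ngram_freqs_alt documents n

-- ===== LEMMAS AND PROOFS =====

-- the two per-document loop bodies, named so the outer induction can speak about them
def pvStepA (n : Int) (st : PySem.Dict String (PySem.Dict String Int) × PySem.Dict String Int)
    (doc : String × String) : PySem.Dict String (PySem.Dict String Int) × PySem.Dict String Int :=
  (PySem.List.pyRange 0 (((PySem.Str.split₀ doc.1).length : Int) - n + 1) 1).foldl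
    (fun st i =>
      (st.1.modify doc.2 PySem.Dict.empty
        (fun c => c.modify (PySem.Str.join " " (PySem.List.slice (PySem.Str.split₀ doc.1) (some i) (some (i + n)))) 0 (· + 1)),
       st.2.insert doc.2 (st.2.getD doc.2 0 + 1)))
    (if st.1.contains doc.2 then st.1 else st.1.insert doc.2 PySem.Dict.empty, st.2)

def pvStepB (n : Int) (st : PySem.Dict String (PySem.Dict String Int) × PySem.Dict String Int)
    (doc : String × String) : PySem.Dict String (PySem.Dict String Int) × PySem.Dict String Int :=
  ((if st.1.contains doc.2 then st.1 else st.1.insert doc.2 PySem.Dict.empty).insert doc.2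
     ((pvNgrams (PySem.Str.split₀ doc.1) n).foldl (fun c g => c.modify g 0 (· + 1))
       ((if st.1.contains doc.2 then st.1 else st.1.insert doc.2 PySem.Dict.empty).getD doc.2 PySem.Dict.empty)),
   if (pvNgrams (PySem.Str.split₀ doc.1) n).isEmpty then st.2
   else st.2.insert doc.2 (st.2.getD doc.2 0 + ((pvNgrams (PySem.Str.split₀ doc.1) n).length : Int)))

theorem pvA_eq_fold (documents : List (String × String)) (n : Int) :
    calculate_ngram_freqs documents n =
      (let st := documents.foldl (pvStepA n) (PySem.Dict.empty, PySem.Dict.empty)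
       (st.1.items.map (fun p => (p.1, p.2.items)), st.2.items)) := rfl

theorem pvB_eq_fold (documents : List (String × String)) (n : Int) :
    calculate_ngram_freqs_alt documents n =
      (let st := documents.foldl (pvStepB n) (PySem.Dict.empty, PySem.Dict.empty)
       (st.1.items.map (fun p => (p.1, p.2.items)), st.2.items)) := rfl

def pvRollStep (st : List String × List String) (w : String) : List String × List String :=
  let window := PySem.List.slice st.1 (some 1) none ++ [w]
  (window, st.2 ++ [PySem.Str.join " " window])

-- rolling-window invariant: B's slide over the remaining words emits the joined n-windows in order
theorem pvRoll (nt : Nat) (hnt : 1 ≤ nt) :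
    ∀ (rest win acc : List String), win.length = nt →
      ((rest.foldl pvRollStep (win, acc)).2
        = acc ++ (List.range rest.length).map
            (fun j => PySem.Str.join " " (((win ++ rest).drop (j + 1)).take nt))) := by
  intro rest
  induction rest with
  | nil => intro win acc _; simp
  | cons w rest ih =>
    intro win acc hw
    have hwin : win ≠ [] := by intro h; subst h; simp at hw; omega
    have h1 : 1 ≤ win.length := by rw [hw]; omega
    have hstep : pvRollStep (win, acc) w
        = (win.tail ++ [w], acc ++ [PySem.Str.join " " (win.tail ++ [w])]) := by
      simp [pvRollStep, PySem.List.slice_from_one]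
    have hlen' : (win.tail ++ [w]).length = nt := by
      simp [List.length_tail]; omega
    have hdrop1 : (win ++ w :: rest).drop 1 = win.tail ++ (w :: rest) := by
      rw [List.drop_append_of_le_length h1, List.drop_one]
    have hfirst : ((win ++ w :: rest).drop 1).take nt = win.tail ++ [w] := by
      rw [hdrop1, List.take_append]
      have ht : win.tail.length = nt - 1 := by simp [List.length_tail, hw]
      rw [List.take_of_length_le (by omega)]
      congr 1
      rw [ht, show nt - (nt - 1) = 1 by omega]
      rfl
    rw [List.foldl_cons, hstep,
        ih (win.tail ++ [w]) (acc ++ [PySem.Str.join " " (win.tail ++ [w])]) hlen']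
    simp only [List.length_cons, List.range_succ_eq_map, List.map_cons, List.map_map]
    rw [List.append_assoc]
    congr 1
    rw [List.singleton_append]
    congr 1
    · rw [zero_add, hfirst]
    · apply List.map_congr_left
      intro j _
      simp only [Function.comp_apply]
      congr 2
      have hww : win.tail ++ [w] ++ rest = (win ++ w :: rest).drop 1 := by
        rw [hdrop1]; simp
      rw [hww, List.drop_drop]
      congr 1
      omega

-- the n-gram list B builds equals the list of joined slices A iterates over (n ≥ 1)
theorem pvNgrams_eq (words : List String) (n : Int) (hn : 1 ≤ n) :
    pvNgrams words n = (PySem.List.pyRange 0 ((words.length : Int) - n + 1) 1).map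
      (fun i => PySem.Str.join " " (PySem.List.slice words (some i) (some (i + n)))) := by
  by_cases hlt : (words.length : Int) < n
  · rw [pvNgrams, if_pos (Or.inr hlt), PySem.List.pyRange_one_eq_nil (by omega)]
    simp
  · rw [not_lt] at hlt
    obtain ⟨nt, rfl⟩ : ∃ nt : Nat, n = (nt : Int) := ⟨n.toNat, by omega⟩
    have hnt : 1 ≤ nt := by exact_mod_cast hn
    have hntL : nt ≤ words.length := by exact_mod_cast hlt
    rw [pvNgrams, if_neg (by omega)]
    simp only []
    rw [PySem.List.slice_to_natCast, PySem.List.slice_from_natCast]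
    have hfun : (fun (st : List String × List String) w =>
        let window := PySem.List.slice st.1 (some 1) none ++ [w]
        (window, st.2 ++ [PySem.Str.join " " window])) = pvRollStep := rfl
    rw [hfun, pvRoll nt hnt (words.drop nt) (words.take nt) _ (by simp; omega)]
    rw [List.take_append_drop]
    have hL : ((words.length : Int) - (nt : Int) + 1 - 0).toNat = words.length - nt + 1 := by
      omega
    rw [PySem.List.pyRange_one, hL, List.map_map]
    have hlen : (words.drop nt).length = words.length - nt := by simp
    rw [hlen, List.range_succ_eq_map]
    simp only [List.map_cons, List.map_map, List.singleton_append]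
    congr 1
    · simp only [Function.comp_apply, Nat.cast_zero, zero_add]
      simp [PySem.List.slice_to_natCast]
    · apply List.map_congr_left
      intro j _
      simp only [Function.comp_apply, zero_add]
      rw [show ((j + 1 : Nat) : Int) + (nt : Int) = (((j + 1 + nt : Nat)) : Int) by push_cast; ring]
      rw [PySem.List.slice_natCast]
      congr 2
      omega

-- overwriting an existing key with its own value is the identity (unique keys)
theorem pvInsert_getD_self {ν : Type} (d : PySem.Dict String ν) (k : String)
    (hnd : d.keys.Nodup) (hc : d.contains k = true) (dflt : ν) :
    d.insert k (d.getD k dflt) = d := by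
  apply PySem.Dict.ext
  rw [PySem.Dict.items_insert_of_contains d (d.getD k dflt) hc]
  conv_rhs => rw [← List.map_id d.items]
  apply List.map_congr_left
  rintro ⟨a, b⟩ hp
  simp only [id_eq]
  by_cases hpk : ((a, b).1 == k) = true
  · rw [if_pos hpk]
    have hk : a = k := by simpa using hpk
    subst hk
    have hv : d.getD a dflt = b := PySem.Dict.getD_of_mem_items d hp hnd dflt
    rw [hv]
  · rw [if_neg hpk]

-- A's repeated nested-modify loop at one outer key collapses to one insert of the inner fold
theorem pvNfFold (grams : List String) (cat : String)
    (d : PySem.Dict String (PySem.Dict String Int)) (c0 : PySem.Dict String Int) :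
    grams.foldl (fun d g => d.modify cat PySem.Dict.empty (fun c => c.modify g 0 (· + 1)))
        (d.insert cat c0)
      = d.insert cat (grams.foldl (fun c g => c.modify g 0 (· + 1)) c0) := by
  induction grams generalizing c0 with
  | nil => rfl
  | cons g gs ih =>
    simp only [List.foldl_cons]
    have hm : ∀ (e : PySem.Dict String (PySem.Dict String Int)) k dflt f,
        e.modify k dflt f = e.insert k (f (e.getD k dflt)) := fun _ _ _ _ => rfl
    rw [hm, PySem.Dict.getD_insert_self, PySem.Dict.insert_insert_self, ih]

-- A's nested-counter loop per document, started from the category-ensured dict, equals B's per-doc insert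
theorem pvNf_eq (grams : List String) (cat : String)
    (d : PySem.Dict String (PySem.Dict String Int)) (hnd : d.keys.Nodup) :
    grams.foldl (fun e g => e.modify cat PySem.Dict.empty (fun c => c.modify g 0 (· + 1)))
        (if d.contains cat then d else d.insert cat PySem.Dict.empty)
      = (if d.contains cat then d else d.insert cat PySem.Dict.empty).insert cat
          (grams.foldl (fun c g => c.modify g 0 (· + 1))
            ((if d.contains cat then d else d.insert cat PySem.Dict.empty).getD cat PySem.Dict.empty)) := by
  by_cases hc : d.contains cat
  · rw [if_pos hc]
    have e1 : d.insert cat (d.getD cat PySem.Dict.empty) = d :=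
      pvInsert_getD_self d cat hnd hc PySem.Dict.empty
    conv_lhs => rw [← e1]
    rw [pvNfFold]
  · rw [if_neg hc, pvNfFold, PySem.Dict.getD_insert_self, PySem.Dict.insert_insert_self]

-- A's per-n-gram category increments collapse to one increment by the n-gram count
theorem pvCfFold (grams : List String) (cat : String) (cf : PySem.Dict String Int)
    (h : grams ≠ []) :
    grams.foldl (fun c (_ : String) => c.insert cat (c.getD cat 0 + 1)) cf
      = cf.insert cat (cf.getD cat 0 + (grams.length : Int)) := by
  induction grams generalizing cf with
  | nil => exact absurd rfl h
  | cons g gs ih =>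
    simp only [List.foldl_cons]
    by_cases hgs : gs = []
    · subst hgs; simp
    · rw [ih _ hgs, PySem.Dict.getD_insert_self, PySem.Dict.insert_insert_self]
      congr 1
      push_cast [List.length_cons]
      ring

theorem pvCf_eq (grams : List String) (cat : String) (cf : PySem.Dict String Int) :
    grams.foldl (fun c (_ : String) => c.insert cat (c.getD cat 0 + 1)) cf
      = if grams.isEmpty then cf else cf.insert cat (cf.getD cat 0 + (grams.length : Int)) := by
  by_cases h : grams = []
  · subst h; simp
  · rw [pvCfFold grams cat cf h, if_neg (by simpa [List.isEmpty_iff] using h)]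

theorem pvStep_eq (n : Int) (hn : 1 ≤ n)
    (st : PySem.Dict String (PySem.Dict String Int) × PySem.Dict String Int)
    (hnd : st.1.keys.Nodup) (doc : String × String) :
    pvStepA n st doc = pvStepB n st doc := by
  unfold pvStepA pvStepB
  rw [← List.foldl_map
      (f := fun i => PySem.Str.join " " (PySem.List.slice (PySem.Str.split₀ doc.1) (some i) (some (i + n))))
      (g := fun (s : PySem.Dict String (PySem.Dict String Int) × PySem.Dict String Int) (g : String) =>
        (s.1.modify doc.2 PySem.Dict.empty (fun c => c.modify g 0 (· + 1)),
         s.2.insert doc.2 (s.2.getD doc.2 0 + 1)))]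
  rw [← pvNgrams_eq (PySem.Str.split₀ doc.1) n hn]
  rw [PySem.List.foldl_prod_mk
      (f := fun (d : PySem.Dict String (PySem.Dict String Int)) (g : String) =>
        d.modify doc.2 PySem.Dict.empty (fun c => c.modify g 0 (· + 1)))
      (g := fun (c : PySem.Dict String Int) (_ : String) => c.insert doc.2 (c.getD doc.2 0 + 1))]
  simp only [Prod.mk.injEq]
  exact ⟨pvNf_eq _ _ _ hnd, pvCf_eq _ _ _⟩

theorem pvStep_nodup (n : Int)
    (st : PySem.Dict String (PySem.Dict String Int) × PySem.Dict String Int)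
    (hnd : st.1.keys.Nodup) (doc : String × String) :
    (pvStepB n st doc).1.keys.Nodup := by
  have hbase : (if st.1.contains doc.2 then st.1 else st.1.insert doc.2 PySem.Dict.empty).keys.Nodup := by
    by_cases h : st.1.contains doc.2
    · rw [if_pos h]; exact hnd
    · rw [if_neg h]; exact PySem.Dict.nodup_keys_insert _ _ _ hnd
  exact PySem.Dict.nodup_keys_insert _ _ _ hbase

theorem pvFold_eq (n : Int) (hn : 1 ≤ n) (documents : List (String × String)) :
    ∀ (st : PySem.Dict String (PySem.Dict String Int) × PySem.Dict String Int),
      st.1.keys.Nodup →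
      documents.foldl (pvStepA n) st = documents.foldl (pvStepB n) st := by
  induction documents with
  | nil => intro st _; rfl
  | cons doc docs ih =>
    intro st hnd
    simp only [List.foldl_cons]
    rw [pvStep_eq n hn st hnd doc]
    exact ih _ (pvStep_nodup n st hnd doc)

-- A's per-document category-total update, projected out of the paired loop
theorem pvStepA_snd (n : Int) (st : PySem.Dict String (PySem.Dict String Int) × PySem.Dict String Int)
    (doc : String × String) :
    (pvStepA n st doc).2 =
      (PySem.List.pyRange 0 (((PySem.Str.split₀ doc.1).length : Int) - n + 1) 1).foldl
        (fun c (_ : Int) => c.insert doc.2 (c.getD doc.2 0 + 1)) st.2 := by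
  unfold pvStepA
  rw [PySem.List.foldl_prod_mk
      (f := fun (d : PySem.Dict String (PySem.Dict String Int)) (i : Int) =>
        d.modify doc.2 PySem.Dict.empty
          (fun c => c.modify (PySem.Str.join " " (PySem.List.slice (PySem.Str.split₀ doc.1) (some i) (some (i + n)))) 0 (· + 1)))
      (g := fun (c : PySem.Dict String Int) (_ : Int) => c.insert doc.2 (c.getD doc.2 0 + 1))]

theorem pvContains_fold {β : Type} (l : List β) (cf : PySem.Dict String Int) (cat k : String)
    (h : cf.contains k = true) :
    (l.foldl (fun c (_ : β) => c.insert cat (c.getD cat 0 + 1)) cf).contains k = true := by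
  induction l generalizing cf with
  | nil => exact h
  | cons x xs ih =>
    exact ih _ (by rw [PySem.Dict.contains_insert, h, Bool.or_true])

theorem pvA_cf_mono (n : Int) (docs : List (String × String)) :
    ∀ (st : PySem.Dict String (PySem.Dict String Int) × PySem.Dict String Int) (k : String),
      st.2.contains k = true → ((docs.foldl (pvStepA n) st).2).contains k = true := by
  induction docs with
  | nil => intro st k h; exact h
  | cons doc docs ih =>
    intro st k h
    rw [List.foldl_cons]
    exact ih _ k (by rw [pvStepA_snd]; exact pvContains_fold _ _ _ _ h)

theorem pvA_cf_first (n : Int) (hn : n ≤ 0)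
    (st : PySem.Dict String (PySem.Dict String Int) × PySem.Dict String Int)
    (doc : String × String) :
    (pvStepA n st doc).2.contains doc.2 = true := by
  rw [pvStepA_snd]
  have h0 : (0 : Int) ≤ ((PySem.Str.split₀ doc.1).length : Int) := Int.natCast_nonneg _
  rw [PySem.List.pyRange_one_cons (by omega), List.foldl_cons]
  exact pvContains_fold _ _ _ _ (PySem.Dict.contains_insert_self _ _ _)

theorem pvB_cf_id (n : Int) (hn : n ≤ 0) (docs : List (String × String)) :
    ∀ (st : PySem.Dict String (PySem.Dict String Int) × PySem.Dict String Int),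
      (docs.foldl (pvStepB n) st).2 = st.2 := by
  induction docs with
  | nil => intro st; rfl
  | cons doc docs ih =>
    intro st
    rw [List.foldl_cons, ih]
    have hng : pvNgrams (PySem.Str.split₀ doc.1) n = [] := by
      rw [pvNgrams, if_pos (Or.inl hn)]
    unfold pvStepB
    rw [hng]
    rfl

-- ===== VERDICT (by name: the statement is the Claim_ definition above) =====
theorem calculate_ngram_freqs_spec : Claim_unchanged_calculate_ngram_freqs := by
  intro documents n _
  unfold Spec_calculate_ngram_freqs
  intro hD
  unfold D_calculate_ngram_freqs at hD
  rw [pvA_eq_fold, pvB_eq_fold]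
  by_cases hdoc : documents = []
  · subst hdoc; rfl
  · have hn : 1 ≤ n := by
      by_contra hc
      exact hD ⟨by omega, hdoc⟩
    rw [pvFold_eq n hn documents _ PySem.Dict.nodup_keys_empty]

theorem calculate_ngram_freqs_tight : Claim_exact_calculate_ngram_freqs := by
  intro documents n _ hD heq
  obtain ⟨hn, hne⟩ := hD
  obtain ⟨d, rest, rfl⟩ := List.exists_cons_of_ne_nil hne
  have hB : (calculate_ngram_freqs_alt (d :: rest) n).2 = [] := by
    rw [pvB_eq_fold]
    show ((d :: rest).foldl (pvStepB n) (PySem.Dict.empty, PySem.Dict.empty)).2.items = []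
    rw [pvB_cf_id n hn]
    rfl
  have hAc : ((d :: rest).foldl (pvStepA n) (PySem.Dict.empty, PySem.Dict.empty)).2.contains d.2 = true := by
    rw [List.foldl_cons]
    exact pvA_cf_mono n rest _ d.2 (pvA_cf_first n hn _ d)
  have hA : (calculate_ngram_freqs (d :: rest) n).2 ≠ [] := by
    rw [pvA_eq_fold]
    show ((d :: rest).foldl (pvStepA n) (PySem.Dict.empty, PySem.Dict.empty)).2.items ≠ []
    intro hnil
    rw [PySem.Dict.contains_iff_mem_keys] at hAc
    simp only [PySem.Dict.keys, hnil, List.map_nil, List.not_mem_nil] at hAc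
  exact hA (by rw [heq, hB])

theorem calculate_ngram_freqs_changed : Claim_changed_calculate_ngram_freqs := by
  unfold Claim_changed_calculate_ngram_freqs
  refine ⟨by decide, by decide, by decide, by decide, by decide⟩
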